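-- pv_equiv track=rewrite | github.com/8adre/cortex | pkg/workloads/cortex/lib/util.py | remove_non_empty_directory_paths
-- ===== SOURCE A (Python) =====
-- from typing import List, Any
--
-- def remove_non_empty_directory_paths(paths: List[str]) -> List[str]:
--     """
--     Eliminates dir paths from the tree that are not empty.
--
--     If paths looks like:
--     models/tensorflow/
--     models/tensorflow/iris/1569001258
--     models/tensorflow/iris/1569001258/saved_model.pb
--
--     Then after calling this function, it will look like:
--     models/tensorflow/iris/1569001258/saved_model.pb
--     """
--     new_paths = []
--
--     split_paths = [list(filter(lambda x: x != "", path.split("/"))) for path in paths]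
--     create_set_from_list = lambda l: set([(idx, split) for idx, split in enumerate(l)])
--     split_set_paths = [create_set_from_list(split_path) for split_path in split_paths]
--
--     for id_a, a in enumerate(split_set_paths):
--         matches = 0
--         for id_b, b in enumerate(split_set_paths):
--             if id_a == id_b:
--                 continue
--             if a.issubset(b):
--                 matches += 1
--         if matches == 0:
--             new_paths.append(paths[id_a])
--
--     return new_paths
-- ===== SOURCE B (Python) =====
-- from typing import List
--
-- def remove_non_empty_directory_paths(paths: List[str]) -> List[str]:
--     # One pass building a component-count table and a proper-prefix set, then a filter:
--     # a path survives iff its component tuple is unique and is not a proper prefix of any path.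
--     split = [tuple(c for c in p.split("/") if c != "") for p in paths]
--     counts = {}
--     for t in split:
--         counts[t] = counts.get(t, 0) + 1
--     prefixes = set()
--     for t in split:
--         for k in range(len(t)):
--             prefixes.add(t[:k])
--     return [p for p, t in zip(paths, split) if counts[t] == 1 and t not in prefixes]
-- ===== Notes on version B (the rewrite author's own statement) =====
-- stated objective: faster
-- what changed: A compares every pair of paths with an O(n^2) enumerate-set subset scan; B builds a component-tuple count table and a set of all proper component-prefixes in one pass and keeps a path iff its tuple is unique and not in the prefix set, removing the inner scan.
import Mathlib
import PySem

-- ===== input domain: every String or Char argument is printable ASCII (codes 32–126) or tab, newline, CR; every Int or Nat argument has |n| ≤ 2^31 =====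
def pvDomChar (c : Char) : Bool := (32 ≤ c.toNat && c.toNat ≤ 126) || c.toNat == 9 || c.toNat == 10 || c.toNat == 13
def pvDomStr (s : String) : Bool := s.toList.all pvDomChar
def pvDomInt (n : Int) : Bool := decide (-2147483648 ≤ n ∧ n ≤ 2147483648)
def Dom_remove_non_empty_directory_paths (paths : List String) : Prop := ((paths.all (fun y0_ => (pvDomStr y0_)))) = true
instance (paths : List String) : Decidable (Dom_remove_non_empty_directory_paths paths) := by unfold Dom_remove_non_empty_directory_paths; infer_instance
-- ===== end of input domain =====

-- B replaces A's all-pairs subset scan by one component-count table plus one proper-prefix set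
-- (a path survives iff its component tuple is unique and not a proper prefix of any path): alternative single-pass-index algorithm.

-- ===== PORT A =====
def remove_non_empty_directory_paths (paths : List String) : List String :=
  let split_paths := paths.map (fun path => ((PySem.Str.split? path "/").getD []).filter (fun x => x != ""))
  let split_set_paths := split_paths.map (fun l => PySem.Set.ofList (PySem.List.enumerate l))
  (PySem.List.enumerate split_set_paths).foldl (fun new_paths pa =>
    let _matches := (PySem.List.enumerate split_set_paths).foldl (fun m pb =>
      if pa.1 == pb.1 then m
      else if PySem.Set.issubset pa.2 pb.2 then m + 1 else m) (0 : Int)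
    if _matches == 0 then new_paths ++ [PySem.List.pyGetD paths pa.1 ""] else new_paths) []

-- ===== PORT B =====
def remove_non_empty_directory_paths_alt (paths : List String) : List String :=
  let split := paths.map (fun p => ((PySem.Str.split? p "/").getD []).filter (fun c => c != ""))
  let counts := split.foldl (fun d t => d.insert t (d.getD t 0 + 1)) (PySem.Dict.empty : PySem.Dict (List String) Int)
  let prefixes := split.foldl (fun s t =>
      (PySem.List.pyRange 0 (PySem.List.len t) 1).foldl
        (fun s k => PySem.Set.add s (PySem.List.slice t none (some k))) s)
    (PySem.Set.empty : PySem.Set (List String))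
  ((paths.zip split).filter
      (fun pt => counts.getD pt.2 0 == 1 && !(PySem.Set.contains prefixes pt.2))).map (·.1)

-- ===== PRECONDITION & SPEC =====
def Spec_remove_non_empty_directory_paths (paths : List String) (out : List String) : Prop := out = remove_non_empty_directory_paths_alt paths
instance (paths : List String) (out : List String) : Decidable (Spec_remove_non_empty_directory_paths paths out) := by unfold Spec_remove_non_empty_directory_paths; infer_instance

-- ===== CLAIM (what is proved, stated in full; the proofs are below) =====
def Claim_equal_remove_non_empty_directory_paths : Prop := ∀ (paths : List String), Dom_remove_non_empty_directory_paths paths → Spec_remove_non_empty_directory_paths paths (remove_non_empty_directory_paths paths)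

-- ===== LEMMAS AND PROOFS =====

-- the component list of a path (both ports compute it inline)
def pvComps (p : String) : List String := ((PySem.Str.split? p "/").getD []).filter (fun c => c != "")

-- canonical characterisation both ports are reduced to:
-- keep p iff exactly one path's component list has pvComps p as a (possibly equal) prefix
def pvKeep (paths : List String) (p : String) : Bool :=
  decide (paths.countP (fun y => decide (pvComps p <+: pvComps y)) = 1)

-- ---- generic list lemmas ----

theorem pv_mem_enum_fst {α : Type} (xs : List α) (s : Int) (q : Int × α)
    (h : q ∈ PySem.List.enumerate xs s) : s ≤ q.1 ∧ q.1 < s + xs.length := by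
  rcases (PySem.List.mem_enumerate_iff _ _ _).1 h with ⟨k, hk, rfl⟩
  simp; omega

-- enumerate-set subset ↔ list prefix
theorem pv_enumSub (xs ys : List String) (s : Int) :
    (∀ q ∈ PySem.List.enumerate xs s, q ∈ PySem.List.enumerate ys s) ↔ xs <+: ys := by
  induction xs generalizing ys s with
  | nil => simp [PySem.List.enumerate_nil]
  | cons x xs ih =>
    cases ys with
    | nil =>
      simp only [PySem.List.enumerate_cons, PySem.List.enumerate_nil]
      constructor
      · intro h; exact absurd (h (s, x) List.mem_cons_self) (List.not_mem_nil)
      · intro h; simp at h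
    | cons y ys =>
      simp only [PySem.List.enumerate_cons]
      constructor
      · intro h
        have hx := h (s, x) (by simp)
        have hx' : x = y := by
          rcases List.mem_cons.1 hx with h' | h'
          · simpa using congrArg Prod.snd h'
          · have := pv_mem_enum_fst ys (s+1) _ h'; simp at this
        subst hx'
        have htail : ∀ q ∈ PySem.List.enumerate xs (s+1), q ∈ PySem.List.enumerate ys (s+1) := by
          intro q hq
          have := h q (List.mem_cons_of_mem _ hq)
          rcases List.mem_cons.1 this with h' | h'
          · have := pv_mem_enum_fst xs (s+1) q hq; rw [h'] at this; simp at this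
          · exact h'
        exact List.cons_prefix_cons.2 ⟨rfl, (ih ys (s+1)).1 htail⟩
      · intro h q hq
        rcases List.cons_prefix_cons.1 h with ⟨rfl, htail⟩
        rcases List.mem_cons.1 hq with h' | h'
        · exact h' ▸ List.mem_cons_self
        · exact List.mem_cons_of_mem _ ((ih ys (s+1)).2 htail q h')

theorem pv_subset_iff_prefix (xs ys : List String) :
    PySem.Set.issubset (PySem.Set.ofList (PySem.List.enumerate xs 0))
      (PySem.Set.ofList (PySem.List.enumerate ys 0)) = true ↔ xs <+: ys := by
  rw [PySem.Set.issubset_iff]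
  constructor
  · intro h; exact (pv_enumSub xs ys 0).1 (fun q hq => (PySem.Set.mem_ofList _ _).1 (h q ((PySem.Set.mem_ofList _ _).2 hq)))
  · intro h q hq
    exact (PySem.Set.mem_ofList _ _).2 ((pv_enumSub xs ys 0).2 h q ((PySem.Set.mem_ofList _ _).1 hq))

-- countP over an enumerate with a snd-only predicate
theorem pv_countP_enum_snd {α : Type} (xs : List α) (s : Int) (q : α → Bool) :
    (PySem.List.enumerate xs s).countP (fun p => q p.2) = xs.countP q := by
  induction xs generalizing s with
  | nil => simp [PySem.List.enumerate_nil]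
  | cons x xs ih => simp [PySem.List.enumerate_cons, List.countP_cons, ih]

-- map-snd of a snd-filtered enumerate
theorem pv_enum_filter_snd {α : Type} (xs : List α) (s : Int) (q : α → Bool) :
    (((PySem.List.enumerate xs s).filter (fun p => q p.2)).map Prod.snd) = xs.filter q := by
  induction xs generalizing s with
  | nil => simp [PySem.List.enumerate_nil]
  | cons x xs ih =>
    simp only [PySem.List.enumerate_cons, List.filter_cons]
    by_cases h : q x <;> simp [h, ih]

theorem pv_enumerate_map {α β : Type} (g : α → β) (xs : List α) (s : Int) :
    PySem.List.enumerate (xs.map g) s = (PySem.List.enumerate xs s).map (fun p => (p.1, g p.2)) := by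
  induction xs generalizing s with
  | nil => simp [PySem.List.enumerate_nil]
  | cons x xs ih => simp [PySem.List.enumerate_cons, ih]

theorem pv_zip_self_map {α β : Type} (xs : List α) (f : α → β) :
    xs.zip (xs.map f) = xs.map (fun x => (x, f x)) := by
  induction xs with
  | nil => simp
  | cons x xs ih => simp [ih]

-- prefix-count splits as equal-count plus proper-prefix-count
theorem pv_countP_prefix_split (l : List String) (f : String → List String) (t : List String) :
    l.countP (fun y => decide (t <+: f y)) =
      l.countP (fun y => f y == t) +
      l.countP (fun y => decide (t <+: f y) && !(f y == t)) := by
  induction l with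
  | nil => simp
  | cons x l ih =>
    simp only [List.countP_cons, ih]
    by_cases he : f x = t
    · subst he
      simp
      omega
    · by_cases hp : t <+: f x <;> simp [he, hp] <;> omega

-- the all-pairs count with index i removed, at a decomposed position
theorem pv_enum_count (pre post : List (PySem.Set (Int × String)))
    (a : PySem.Set (Int × String)) (i : Int) (hi : i = (pre.length : Int)) :
    (PySem.List.enumerate (pre ++ a :: post)).countP
        (fun pb => !(i == pb.1) && PySem.Set.issubset a pb.2) + 1
      = (pre ++ a :: post).countP (fun b => PySem.Set.issubset a b) := by
  subst hi
  rw [PySem.List.enumerate_append]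
  simp only [List.countP_append, PySem.List.enumerate_cons, List.countP_cons]
  have h1 : (PySem.List.enumerate pre 0).countP
      (fun pb => !((pre.length : Int) == pb.1) && PySem.Set.issubset a pb.2)
      = pre.countP (fun b => PySem.Set.issubset a b) := by
    rw [List.countP_congr ?_, pv_countP_enum_snd]
    intro pb hpb
    have := pv_mem_enum_fst _ _ _ hpb
    have hne : ¬ (((pre.length : Int) == pb.1) = true) := by simp at this ⊢; omega
    simp [hne]
  have h2 : (PySem.List.enumerate post (0 + (pre.length : Int) + 1)).countP
      (fun pb => !((pre.length : Int) == pb.1) && PySem.Set.issubset a pb.2)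
      = post.countP (fun b => PySem.Set.issubset a b) := by
    rw [List.countP_congr ?_, pv_countP_enum_snd]
    intro pb hpb
    have := pv_mem_enum_fst _ _ _ hpb
    have hne : ¬ (((pre.length : Int) == pb.1) = true) := by simp at this ⊢; omega
    simp [hne]
  have hmid : (!((pre.length : Int) == (0 + (pre.length : Int), a).1) &&
      PySem.Set.issubset a (0 + (pre.length : Int), a).2) = false := by simp
  have hmid2 : PySem.Set.issubset a a = true := by
    rw [PySem.Set.issubset_iff]; intro x hx; exact hx
  rw [h1, h2, hmid, hmid2]
  simp
  omega

-- ---- A reduced to canonical form ----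

theorem pv_A_eq_canon (paths : List String) :
    remove_non_empty_directory_paths paths = paths.filter (pvKeep paths) := by
  simp only [remove_non_empty_directory_paths]
  set g : String → PySem.Set (Int × String) :=
    fun p => PySem.Set.ofList (PySem.List.enumerate (pvComps p)) with hg
  have hmapg : (paths.map (fun path => ((PySem.Str.split? path "/").getD []).filter (fun x => x != ""))).map
      (fun l => PySem.Set.ofList (PySem.List.enumerate l)) = paths.map g := by
    rw [List.map_map]; rfl
  rw [hmapg]
  set L := paths.map g with hL
  -- inner loop is a count
  have hinner : ∀ pa : Int × PySem.Set (Int × String),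
      (PySem.List.enumerate L).foldl (fun m pb =>
        if pa.1 == pb.1 then m
        else if PySem.Set.issubset pa.2 pb.2 then m + 1 else m) (0 : Int)
      = ((PySem.List.enumerate L).countP
          (fun pb => !(pa.1 == pb.1) && PySem.Set.issubset pa.2 pb.2) : Int) := by
    intro pa
    have hfun : (fun (m : Int) (pb : Int × PySem.Set (Int × String)) =>
        if pa.1 == pb.1 then m
        else if PySem.Set.issubset pa.2 pb.2 then m + 1 else m)
      = (fun m pb => if (!(pa.1 == pb.1) && PySem.Set.issubset pa.2 pb.2) then m + 1 else m) := by
      funext m pb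
      by_cases h1 : pa.1 == pb.1 <;> by_cases h2 : PySem.Set.issubset pa.2 pb.2 <;> simp [h1, h2]
    rw [hfun, PySem.List.foldl_if_add_one]
    simp
  have hfun2 : (fun (new_paths : List String) (pa : Int × PySem.Set (Int × String)) =>
      if ((PySem.List.enumerate L).foldl (fun m pb =>
          if pa.1 == pb.1 then m
          else if PySem.Set.issubset pa.2 pb.2 then m + 1 else m) (0 : Int)) == 0
      then new_paths ++ [PySem.List.pyGetD paths pa.1 ""] else new_paths)
    = (fun acc pa =>
      if ((PySem.List.enumerate L).countP
          (fun pb => !(pa.1 == pb.1) && PySem.Set.issubset pa.2 pb.2) : Int) == 0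
      then acc ++ [PySem.List.pyGetD paths pa.1 ""] else acc) := by
    funext acc pa; rw [hinner pa]
  rw [hfun2]
  rw [PySem.List.foldl_append_if]
  -- on members of enumerate L, the count condition is the canonical one
  have hfilter : (PySem.List.enumerate L).filter
      (fun pa => ((PySem.List.enumerate L).countP
          (fun pb => !(pa.1 == pb.1) && PySem.Set.issubset pa.2 pb.2) : Int) == 0)
    = (PySem.List.enumerate L).filter (fun pa => L.countP (fun b => PySem.Set.issubset pa.2 b) == 1) := by
    apply List.filter_congr
    intro pa hpa
    have hdecomp : ∃ pre post, L = pre ++ pa.2 :: post ∧ pa.1 = (pre.length : Int) := by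
      rcases (PySem.List.mem_enumerate_iff _ _ _).1 hpa with ⟨k, hk, hpaeq⟩
      refine ⟨L.take k, L.drop (k+1), ?_, ?_⟩
      · rw [hpaeq]
        rw [List.getElem_cons_drop, List.take_append_drop]
      · rw [hpaeq]
        simp
        omega
    rcases hdecomp with ⟨pre, post, hL2, hi⟩
    rw [hL2]
    have hc := pv_enum_count pre post pa.2 pa.1 hi
    rw [Bool.eq_iff_iff]
    simp only [beq_iff_eq]
    constructor
    · intro h
      rw [← hc]
      have h0 : (PySem.List.enumerate (pre ++ pa.2 :: post)).countP
          (fun pb => !(pa.1 == pb.1) && PySem.Set.issubset pa.2 pb.2) = 0 := by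
        exact_mod_cast h
      omega
    · intro h
      rw [← hc] at h
      have h0 : (PySem.List.enumerate (pre ++ pa.2 :: post)).countP
          (fun pb => !(pa.1 == pb.1) && PySem.Set.issubset pa.2 pb.2) = 0 := by omega
      rw [h0]
      rfl
  rw [hfilter]
  -- drop the enumerate
  rw [hL, pv_enumerate_map, List.filter_map, List.map_map, List.nil_append]
  have hmapcong : ∀ p ∈ (PySem.List.enumerate paths).filter
        ((fun pa : Int × PySem.Set (Int × String) =>
            (List.map g paths).countP (fun b => PySem.Set.issubset pa.2 b) == 1) ∘
          (fun p : Int × String => (p.1, g p.2))),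
      ((fun pa : Int × PySem.Set (Int × String) => PySem.List.pyGetD paths pa.1 "") ∘
        (fun p : Int × String => (p.1, g p.2))) p = p.2 := by
    intro p hp
    have hp' := List.mem_of_mem_filter hp
    rcases (PySem.List.mem_enumerate_iff _ _ _).1 hp' with ⟨k, hk, rfl⟩
    simp only [Function.comp]
    have h01 : (0:Int) + (k:Int) = ((k : Nat) : Int) := by omega
    rw [h01, PySem.List.pyGetD_natCast]
    simp [List.getD_eq_getElem?_getD, hk]
  rw [List.map_congr_left hmapcong]
  have hcompf : ((fun pa : Int × PySem.Set (Int × String) =>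
        (List.map g paths).countP (fun b => PySem.Set.issubset pa.2 b) == 1) ∘
      (fun p : Int × String => (p.1, g p.2)))
      = (fun p : Int × String =>
        (List.map g paths).countP (fun b => PySem.Set.issubset (g p.2) b) == 1) := rfl
  rw [hcompf]
  rw [pv_enum_filter_snd paths 0
    (fun t => (List.map g paths).countP (fun b => PySem.Set.issubset (g t) b) == 1)]
  -- pointwise: canonical predicate
  apply List.filter_congr
  intro x _
  unfold pvKeep
  rw [List.countP_map]
  have hco : (fun b => PySem.Set.issubset (g x) b) ∘ g = fun y => PySem.Set.issubset (g x) (g y) := rfl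
  rw [hco]
  rw [List.countP_congr (q := fun y => decide (pvComps x <+: pvComps y))]
  · rw [Bool.eq_iff_iff]
    simp
  · intro y _
    simp only [decide_eq_true_eq]
    exact pv_subset_iff_prefix (pvComps x) (pvComps y)

-- ---- B reduced to canonical form ----

theorem pv_mem_prefixes (split : List (List String)) (t : List String) :
    PySem.Set.contains (split.foldl (fun s u =>
        (PySem.List.pyRange 0 (PySem.List.len u) 1).foldl
          (fun s k => PySem.Set.add s (PySem.List.slice u none (some k))) s)
      (PySem.Set.empty : PySem.Set (List String))) t = true
    ↔ ∃ u ∈ split, t <+: u ∧ t ≠ u := by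
  rw [PySem.Set.contains_iff]
  have gen : ∀ (s0 : PySem.Set (List String)),
      t ∈ split.foldl (fun s u =>
        (PySem.List.pyRange 0 (PySem.List.len u) 1).foldl
          (fun s k => PySem.Set.add s (PySem.List.slice u none (some k))) s) s0
      ↔ t ∈ s0 ∨ ∃ u ∈ split, ∃ k : Int, k ∈ PySem.List.pyRange 0 (PySem.List.len u) 1 ∧
          t = PySem.List.slice u none (some k) := by
    induction split with
    | nil => simp
    | cons u split ih =>
      intro s0
      simp only [List.foldl_cons]
      rw [ih]
      rw [PySem.Set.mem_foldl_add]
      constructor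
      · rintro (⟨h | ⟨k, hk, ht⟩⟩ | ⟨v, hv, k, hk, ht⟩)
        · exact Or.inl h
        · exact Or.inr ⟨u, by simp, k, hk, ht⟩
        · exact Or.inr ⟨v, by simp [hv], k, hk, ht⟩
      · rintro (h | ⟨v, hv, k, hk, ht⟩)
        · exact Or.inl (Or.inl h)
        · rcases List.mem_cons.1 hv with rfl | hv'
          · exact Or.inl (Or.inr ⟨k, hk, ht⟩)
          · exact Or.inr ⟨v, hv', k, hk, ht⟩
  rw [gen]
  simp only [PySem.Set.empty]
  constructor
  · rintro (h | ⟨u, hu, k, hk, ht⟩)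
    · simp at h
    · rw [PySem.List.mem_pyRange_one] at hk
      rw [PySem.List.len_eq] at hk
      have h0 : (0:Int) ≤ k := hk.1
      rw [PySem.List.slice_to u h0] at ht
      refine ⟨u, hu, ?_, ?_⟩
      · exact ht ▸ List.take_prefix _ _
      · intro he
        have : (u.take k.toNat).length = u.length := by rw [← ht, he]
        simp at this
        omega
  · rintro ⟨u, hu, hpre, hne⟩
    refine Or.inr ⟨u, hu, (t.length : Int), ?_, ?_⟩
    · rw [PySem.List.mem_pyRange_one, PySem.List.len_eq]
      have hle := hpre.length_le
      have : t.length ≠ u.length := fun h => hne (List.IsPrefix.eq_of_length hpre h)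
      omega
    · rw [PySem.List.slice_to u (by positivity), Int.toNat_natCast]
      exact List.prefix_iff_eq_take.1 hpre

theorem pv_B_eq_canon (paths : List String) :
    remove_non_empty_directory_paths_alt paths = paths.filter (pvKeep paths) := by
  simp only [remove_non_empty_directory_paths_alt]
  have hmap : paths.map (fun p => ((PySem.Str.split? p "/").getD []).filter (fun c => c != "")) = paths.map pvComps := rfl
  rw [hmap]
  set split := paths.map pvComps with hsplit
  rw [pv_zip_self_map, List.filter_map, List.map_map]
  have hcong : ∀ x ∈ paths,
      ((fun pt : String × List String => (split.foldl (fun d t => d.insert t (d.getD t 0 + 1))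
          (PySem.Dict.empty : PySem.Dict (List String) Int)).getD pt.2 0 == 1 &&
        !(PySem.Set.contains (split.foldl (fun s t =>
            (PySem.List.pyRange 0 (PySem.List.len t) 1).foldl
              (fun s k => PySem.Set.add s (PySem.List.slice t none (some k))) s)
          (PySem.Set.empty : PySem.Set (List String))) pt.2)) ∘ (fun x => (x, pvComps x))) x
      = pvKeep paths x := by
    intro x hx
    simp only [Function.comp]
    rw [PySem.Dict.getD_foldl_insert_add_one]
    have hd : (PySem.Dict.empty : PySem.Dict (List String) Int).getD (pvComps x) 0 = 0 := rfl
    rw [hd]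
    set t := pvComps x with ht
    -- counts
    have hcnt : split.count t = paths.countP (fun y => pvComps y == t) := by
      rw [hsplit, List.count_eq_countP, List.countP_map]; rfl
    -- prefix split identity
    have hsplitcnt := pv_countP_prefix_split paths pvComps t
    have hkeep : pvKeep paths x = decide (paths.countP (fun y => decide (t <+: pvComps y)) = 1) := rfl
    rw [hkeep]
    have hpos : 0 < paths.countP (fun y => pvComps y == t) := by
      rw [List.countP_pos_iff]
      exact ⟨x, hx, by simp [ht]⟩
    rcases Bool.eq_false_or_eq_true (PySem.Set.contains (split.foldl (fun s u =>
        (PySem.List.pyRange 0 (PySem.List.len u) 1).foldl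
          (fun s k => PySem.Set.add s (PySem.List.slice u none (some k))) s)
      (PySem.Set.empty : PySem.Set (List String))) t) with hc | hc
    · -- t is a proper prefix of some path: B drops it, canonical count is at least 2
      have hyes : ∃ u ∈ split, t <+: u ∧ t ≠ u := (pv_mem_prefixes split t).1 hc
      have hone : 0 < paths.countP (fun y => decide (t <+: pvComps y) && !(pvComps y == t)) := by
        rw [List.countP_pos_iff]
        rcases hyes with ⟨u, hu, hpre, hne⟩
        rw [hsplit] at hu
        rcases List.mem_map.1 hu with ⟨y, hy, rfl⟩
        exact ⟨y, hy, by simp [hpre, (Ne.symm hne : pvComps y ≠ t)]⟩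
      rw [hc, hsplitcnt]
      simp only [Bool.not_true, Bool.and_false]
      rw [Bool.eq_iff_iff]
      simp
      omega
    · -- not a proper prefix of anything
      have hno : ¬ ∃ u ∈ split, t <+: u ∧ t ≠ u := by
        intro hex
        have := (pv_mem_prefixes split t).2 hex
        rw [hc] at this
        exact Bool.false_ne_true this
      have hzero : paths.countP (fun y => decide (t <+: pvComps y) && !(pvComps y == t)) = 0 := by
        rw [List.countP_eq_zero]
        intro y hy
        simp only [Bool.and_eq_true, Bool.not_eq_true', beq_eq_false_iff_ne, ne_eq,
          decide_eq_true_eq, not_and]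
        intro hpre hne
        exact hno ⟨pvComps y, by rw [hsplit]; exact List.mem_map_of_mem hy, hpre, Ne.symm hne⟩
      rw [hc, hcnt, hsplitcnt, hzero]
      simp only [Bool.not_false, Bool.and_true]
      rw [Bool.eq_iff_iff]
      simp
      try omega
  have h1 : paths.filter ((fun pt : String × List String =>
        (split.foldl (fun d t => d.insert t (d.getD t 0 + 1))
          (PySem.Dict.empty : PySem.Dict (List String) Int)).getD pt.2 0 == 1 &&
        !(PySem.Set.contains (split.foldl (fun s t =>
            (PySem.List.pyRange 0 (PySem.List.len t) 1).foldl
              (fun s k => PySem.Set.add s (PySem.List.slice t none (some k))) s)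
          (PySem.Set.empty : PySem.Set (List String))) pt.2)) ∘ (fun x => (x, pvComps x)))
      = paths.filter (pvKeep paths) := List.filter_congr hcong
  rw [h1]
  have h2 : ∀ l : List String,
      l.map ((fun pt : String × List String => pt.1) ∘ (fun x => (x, pvComps x))) = l := by
    intro l
    induction l with
    | nil => rfl
    | cons a l ih => simp only [List.map_cons, Function.comp, ih]
  exact h2 _

-- ===== VERDICT (by name: the statement is the Claim_ definition above) =====
theorem remove_non_empty_directory_paths_spec : Claim_equal_remove_non_empty_directory_paths := by
  intro paths _
  unfold Spec_remove_non_empty_directory_paths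
  rw [pv_A_eq_canon, pv_B_eq_canon]
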